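-- pv_equiv track=rewrite | github.com/Onizuka121/CS-Resources | 1-anno/programmazione/lezioni/punti_retta.py | max_min_points
-- ===== SOURCE A (Python) =====
-- def max_min_points(points):
--     v_max = points[0][1]
--     v_min = points[len(points)-1][1]
--     for point in points:
--         if point[1] > v_max:
--             v_max = point[1]
--         elif point[1] < v_min:
--             v_min = point[1]
--
--
--     return v_max,v_min
-- ===== SOURCE B (Python) =====
-- def max_min_points(points):
--     ys = [p[1] for p in points]
--     return max(ys), min(ys)
-- ===== Notes on version B (the rewrite author's own statement) =====
-- stated objective: simpler
-- what changed: B extracts the y-values once and returns the two builtin reductions max(ys), min(ys), replacing A's single combined loop that threads two running variables through an if/elif branch.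
import Mathlib
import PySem

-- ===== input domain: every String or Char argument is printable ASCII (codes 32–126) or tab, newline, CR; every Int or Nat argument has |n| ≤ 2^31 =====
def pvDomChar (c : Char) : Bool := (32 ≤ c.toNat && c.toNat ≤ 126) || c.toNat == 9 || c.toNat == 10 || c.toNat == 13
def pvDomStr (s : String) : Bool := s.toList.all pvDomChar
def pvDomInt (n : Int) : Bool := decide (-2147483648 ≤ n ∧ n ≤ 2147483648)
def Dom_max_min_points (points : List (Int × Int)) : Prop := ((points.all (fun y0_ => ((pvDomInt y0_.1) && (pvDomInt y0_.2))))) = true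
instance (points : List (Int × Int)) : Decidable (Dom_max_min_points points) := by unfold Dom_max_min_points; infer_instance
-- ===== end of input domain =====

-- B replaces A's single combined if/elif loop by extracting the y-values once and taking two
-- independent builtin reductions max(ys), min(ys) (objective: simpler).

-- ===== PORT A =====
-- the for-loop of A, threading (v_max, v_min) with the original if/elif branch order
def pvLoopA : List (Int × Int) → Int × Int → Int × Int
  | [], s => s
  | p :: t, (vmax, vmin) =>
    if p.2 > vmax then pvLoopA t (p.2, vmin)
    else if p.2 < vmin then pvLoopA t (vmax, p.2)
    else pvLoopA t (vmax, vmin)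

def max_min_points (points : List (Int × Int)) : Int × Int :=
  match PySem.List.pyGet? points 0, PySem.List.pyGet? points ((points.length : Int) - 1) with
  | some p0, some pl => pvLoopA points (p0.2, pl.2)
  | _, _ => (0, 0)  -- IndexError (empty list); excluded by Pre_

-- ===== PORT B =====
def max_min_points_alt (points : List (Int × Int)) : Int × Int :=
  let ys := points.map (fun p => p.2)
  match PySem.List.max? ys (fun y => y) with
  | none => (0, 0)  -- ValueError (empty list); excluded by Pre_
  | some M =>
    match PySem.List.min? ys (fun y => y) with
    | none => (0, 0)
    | some m => (M, m)

-- ===== PRECONDITION & SPEC =====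
-- A raises IndexError (and B ValueError) on the empty list; both are excluded.
def Pre_max_min_points (points : List (Int × Int)) : Prop := points ≠ []
instance (points : List (Int × Int)) : Decidable (Pre_max_min_points points) := by unfold Pre_max_min_points; infer_instance
def pvWitness_max_min_points : (List (Int × Int)) := [(1, 2), (3, -4), (0, 7)]
def Spec_max_min_points (points : List (Int × Int)) (out : Int × Int) : Prop := out = max_min_points_alt points
instance (points : List (Int × Int)) (out : Int × Int) : Decidable (Spec_max_min_points points out) := by unfold Spec_max_min_points; infer_instance

-- ===== CLAIM (what is proved, stated in full; the proofs are below) =====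
def Claim_equal_max_min_points : Prop := ∀ (points : List (Int × Int)), Dom_max_min_points points → Pre_max_min_points points → Spec_max_min_points points (max_min_points points)

-- ===== LEMMAS AND PROOFS =====

-- the first component of A's loop is the plain running maximum
lemma pvLoopA_fst : ∀ (l : List (Int × Int)) (vmax vmin : Int),
    (pvLoopA l (vmax, vmin)).1 = l.foldl (fun a p => max a p.2) vmax := by
  intro l
  induction l with
  | nil => intro vmax vmin; simp [pvLoopA]
  | cons x t ih =>
    intro vmax vmin
    simp only [pvLoopA, List.foldl_cons]
    split_ifs with h1 h2
    · rw [ih]; congr 1; omega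
    · rw [ih]; congr 1; omega
    · rw [ih]; congr 1; omega

-- if vmin is already ≤ every remaining y, the second component never changes
lemma pvLoopA_snd_ge : ∀ (l : List (Int × Int)) (vmax vmin : Int),
    (∀ q ∈ l, vmin ≤ q.2) → (pvLoopA l (vmax, vmin)).2 = vmin := by
  intro l
  induction l with
  | nil => intro vmax vmin _; simp [pvLoopA]
  | cons x t ih =>
    intro vmax vmin h
    have hx : vmin ≤ x.2 := h x (by simp)
    have ht : ∀ q ∈ t, vmin ≤ q.2 := fun q hq => h q (by simp [hq])
    simp only [pvLoopA]
    split_ifs with h1 h2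
    · exact ih _ _ ht
    · omega
    · exact ih _ _ ht

-- a minimal element below both starting values is what the second component ends at
lemma pvLoopA_snd_witness : ∀ (l : List (Int × Int)) (vmax vmin : Int) (p : Int × Int),
    p ∈ l → p.2 ≤ vmax → p.2 ≤ vmin → (∀ q ∈ l, p.2 ≤ q.2) →
    (pvLoopA l (vmax, vmin)).2 = p.2 := by
  intro l
  induction l with
  | nil => intro _ _ p hp; simp at hp
  | cons x t ih =>
    intro vmax vmin p hp hmax hmin hall
    have hxt : p = x ∨ p ∈ t := by simpa using hp
    have hallt : ∀ q ∈ t, p.2 ≤ q.2 := fun q hq => hall q (by simp [hq])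
    have hpx : p.2 ≤ x.2 := hall x (by simp)
    simp only [pvLoopA]
    split_ifs with h1 h2
    · -- x.2 > vmax ≥ p.2, so p ≠ x, p ∈ t
      have hne : p.2 ≤ vmax := hmax
      have hpt : p ∈ t := by
        rcases hxt with h | h
        · exfalso; rw [h] at hne; omega
        · exact h
      exact ih _ _ p hpt (le_of_lt (lt_of_le_of_lt hmax h1)) hmin hallt
    · -- vmin := x.2
      rcases hxt with h | hpt
      · subst h
        exact pvLoopA_snd_ge t _ _ hallt
      · exact ih _ _ p hpt hmax (by omega) hallt
    · rcases hxt with h | hpt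
      · subst h
        have hv : p.2 = vmin := by omega
        rw [pvLoopA_snd_ge t _ _ (fun q hq => by have := hallt q hq; omega)]
        omega
      · exact ih _ _ p hpt hmax hmin hallt

-- ===== VERDICT (by name: the statement is the Claim_ definition above) =====
theorem max_min_points_spec : Claim_equal_max_min_points := by
  intro points _ hpre
  cases points with
  | nil => exact absurd rfl hpre
  | cons x t =>
    unfold Spec_max_min_points max_min_points max_min_points_alt
    have h0 : PySem.List.pyGet? (x :: t) 0 = some x := by
      simp [PySem.List.pyGet?, PySem.List.pyIdx?]
    have hl : PySem.List.pyGet? (x :: t) (((x :: t).length : Int) - 1) =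
        some ((x :: t)[t.length]) := by
      simp [PySem.List.pyGet?, PySem.List.pyIdx?]
    have hplmem : (x :: t)[t.length] ∈ (x :: t) := List.getElem_mem _
    rw [h0, hl]
    -- evaluate B's two reductions on the nonempty y-list
    have hmax : PySem.List.max? ((x :: t).map (fun p => p.2)) (fun y => y)
        = some ((t.map (fun p => p.2)).foldl max x.2) := by
      rw [List.map_cons]; exact PySem.List.max?_id_cons _ _
    have hmin : PySem.List.min? ((x :: t).map (fun p => p.2)) (fun y => y)
        = some ((t.map (fun p => p.2)).foldl min x.2) := by
      rw [List.map_cons]; exact PySem.List.min?_id_cons _ _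
    simp only [hmax, hmin]
    set m := (t.map (fun p => p.2)).foldl min x.2 with hm
    have hminspec := PySem.List.min?_isMin (xs := (x :: t).map (fun p => p.2))
        (key := fun y => y) (m := m) hmin
    have hmmem : m ∈ (x :: t).map (fun p => p.2) := PySem.List.min?_mem hmin
    obtain ⟨p, hp, hpm⟩ := List.mem_map.mp hmmem
    have hle : ∀ q ∈ (x :: t), m ≤ q.2 := fun q hq =>
      hminspec q.2 (List.mem_map.mpr ⟨q, hq, rfl⟩)
    have hsnd : (pvLoopA (x :: t) (x.2, ((x :: t)[t.length]).2)).2 = m := by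
      rw [← hpm]
      exact pvLoopA_snd_witness _ _ _ p hp
        (by rw [hpm]; exact hle x (by simp))
        (by rw [hpm]; exact hle _ hplmem)
        (fun q hq => by rw [hpm]; exact hle q hq)
    have hfst : (pvLoopA (x :: t) (x.2, ((x :: t)[t.length]).2)).1
        = (t.map (fun p => p.2)).foldl max x.2 := by
      rw [pvLoopA_fst, List.foldl_cons, List.foldl_map]
      simp
    exact Prod.ext hfst hsnd
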